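-- pv_equiv track=rewrite | github.com/tayayan/HiraganaSuisho | tac_match.py | invert_sfen
-- ===== SOURCE A (Python) =====
-- def invert_sfen(sfen):
--     sfenlist = sfen.split()
--     #盤面を反転
--     chars = list(sfenlist[1])
--     i = 0
--     while i < len(chars) - 1:
--         if chars[i] == '+':
--             chars[i], chars[i + 1] = chars[i + 1], chars[i]
--             i += 2
--         else:
--             i += 1
--     chars = "".join(chars)
--     sfenlist[1] = chars[::-1].swapcase()
--     #手番を反転
--     if sfenlist[2] == "b":
--         sfenlist[2] = "w"
--     elif sfenlist[2] == "w":
--         sfenlist[2] = "b"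
--     #持駒を反転
--     sfenlist[3] = sfenlist[3].swapcase()
--     #sfenlistを結合
--     return " ".join(sfenlist)
-- ===== SOURCE B (Python) =====
-- def invert_sfen(sfen):
--     f0, f1, f2, f3, *rest = sfen.split()
--     # board: single left-to-right pass with a prepend accumulator and a
--     # pending-'+' flag; each (promoted-)piece is swapcased and pushed to the front
--     acc = ""
--     pend = False
--     for ch in f1:
--         if ch == '+' and not pend:
--             pend = True
--         else:
--             ch = ch.swapcase()
--             acc = ('+' + ch if pend else ch) + acc
--             pend = False
--     if pend:  # a trailing lone '+' stays in front, as in the original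
--         acc = '+' + acc
--     turn = {"b": "w", "w": "b"}.get(f2, f2)
--     return " ".join([f0, acc, turn, f3.swapcase()] + rest)
-- ===== Notes on version B (the rewrite author's own statement) =====
-- stated objective: alternative
-- what changed: B inverts the board field in one left-to-right fold with a prepend accumulator and a pending-'+' flag (swapcasing as it goes), instead of A's in-place pair-swap pass followed by whole-string reversal and swapcase; the field list is destructured by unpacking and the turn flip is a table lookup.
import Mathlib
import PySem

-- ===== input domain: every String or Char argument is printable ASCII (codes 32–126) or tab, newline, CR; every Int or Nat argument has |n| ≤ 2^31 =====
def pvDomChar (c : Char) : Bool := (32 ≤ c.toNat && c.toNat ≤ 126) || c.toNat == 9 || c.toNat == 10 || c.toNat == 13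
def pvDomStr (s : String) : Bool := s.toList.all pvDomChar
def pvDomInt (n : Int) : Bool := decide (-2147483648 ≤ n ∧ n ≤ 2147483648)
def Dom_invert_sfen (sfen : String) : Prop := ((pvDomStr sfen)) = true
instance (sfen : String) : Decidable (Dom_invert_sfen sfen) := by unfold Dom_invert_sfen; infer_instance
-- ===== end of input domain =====

-- B inverts the board field in one left-to-right fold with a prepend accumulator and a
-- pending-'+' flag (swapcasing as it goes), instead of A's in-place pair-swap pass followed
-- by whole-string reversal and swapcase (objective: alternative).

-- Python str.swapcase, exact on the ASCII domain (Dom_): lower↔upper per character.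
def swapChar (c : Char) : Char :=
  if PySem.Str.islower c then PySem.Chars.upperChar c
  else if PySem.Str.isupper c then PySem.Chars.lowerChar c
  else c

def swapcaseL (s : List Char) : List Char := s.map swapChar

-- ===== PORT A =====
-- A's while loop over chars: at '+' swap with the next char and advance 2, else advance 1;
-- it stops at len-1, so a final lone char (in particular a trailing '+') is left in place.
def invertBoardLoop : List Char → List Char
  | [] => []
  | [c] => [c]
  | a :: b :: rest =>
    if a = '+' then b :: a :: invertBoardLoop rest
    else a :: invertBoardLoop (b :: rest)
termination_by cs => cs.length

def invert_sfen (sfen : String) : String :=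
  let sfenlist := PySem.Str.split₀ sfen
  let chars := ((PySem.List.pyGet? sfenlist 1).getD "").toList   -- sfenlist[1] (Pre_ gives the index)
  let chars := invertBoardLoop chars
  -- chars[::-1].swapcase()
  let sfenlist := sfenlist.set 1 (String.ofList (swapcaseL chars.reverse))
  let s2 := (PySem.List.pyGet? sfenlist 2).getD ""
  let sfenlist :=
    if s2 = "b" then sfenlist.set 2 "w"
    else if s2 = "w" then sfenlist.set 2 "b"
    else sfenlist
  let s3 := (PySem.List.pyGet? sfenlist 3).getD ""
  let sfenlist := sfenlist.set 3 (String.ofList (swapcaseL s3.toList))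
  PySem.Str.join " " sfenlist

-- ===== PORT B =====
-- one step of B's for-loop: state = (accumulator, pending-'+' flag)
def boardStep (st : List Char × Bool) (ch : Char) : List Char × Bool :=
  if ch = '+' ∧ st.2 = false then (st.1, true)
  else
    let c := swapChar ch
    (if st.2 then '+' :: c :: st.1 else c :: st.1, false)

def invert_sfen_alt (sfen : String) : String :=
  match PySem.Str.split₀ sfen with
  | f0 :: f1 :: f2 :: f3 :: rest =>
    let st := f1.toList.foldl boardStep ([], false)
    let acc := if st.2 then '+' :: st.1 else st.1
    let turn := (PySem.Dict.ofList [("b", "w"), ("w", "b")]).getD f2 f2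
    PySem.Str.join " "
      ([f0, String.ofList acc, turn, String.ofList (swapcaseL f3.toList)] ++ rest)
  | _ => ""   -- fewer than 4 fields: Python unpacking raises ValueError; outside Pre_

-- ===== PRECONDITION & SPEC =====
-- Pre_: the whitespace-split of sfen has at least 4 fields; otherwise A raises IndexError
-- (and B's unpacking raises ValueError).
def Pre_invert_sfen (sfen : String) : Prop := 4 ≤ (PySem.Str.split₀ sfen).length
instance (sfen : String) : Decidable (Pre_invert_sfen sfen) := by unfold Pre_invert_sfen; infer_instance
def pvWitness_invert_sfen : String := "x +p+/++P b Pp 3"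

def Spec_invert_sfen (sfen : String) (out : String) : Prop := out = invert_sfen_alt sfen
instance (sfen : String) (out : String) : Decidable (Spec_invert_sfen sfen out) := by unfold Spec_invert_sfen; infer_instance

-- ===== CLAIM =====
def Claim_equal_invert_sfen : Prop := ∀ (sfen : String), Dom_invert_sfen sfen → Pre_invert_sfen sfen → Spec_invert_sfen sfen (invert_sfen sfen)

-- ===== LEMMAS AND PROOFS =====

theorem swapChar_plus : swapChar '+' = '+' := by decide

-- B's fold (finished with the pending flag) computes the swapcase of the reverse of A's
-- pair-swapped pass, prepended to the starting accumulator.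
theorem boardFold_eq : (cs : List Char) → (acc : List Char) →
    (if (cs.foldl boardStep (acc, false)).2 then
       '+' :: (cs.foldl boardStep (acc, false)).1
     else (cs.foldl boardStep (acc, false)).1)
    = swapcaseL (invertBoardLoop cs).reverse ++ acc
  | [], acc => by simp [invertBoardLoop, swapcaseL]
  | [c], acc => by
    by_cases h : c = '+'
    · simp [invertBoardLoop, swapcaseL, boardStep, h, swapChar_plus]
    · simp [invertBoardLoop, swapcaseL, boardStep, h]
  | a :: b :: rest, acc => by
    by_cases h : a = '+'
    · have s1 : boardStep (acc, false) '+' = (acc, true) := by simp [boardStep]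
      have s2 : boardStep (acc, true) b = ('+' :: swapChar b :: acc, false) := by
        simp [boardStep]
      rw [h]
      simp only [List.foldl_cons, s1, s2]
      rw [boardFold_eq rest ('+' :: swapChar b :: acc)]
      simp [invertBoardLoop, swapcaseL, swapChar_plus]
    · have s1 : boardStep (acc, false) a = (swapChar a :: acc, false) := by
        simp [boardStep, h]
      have ih := boardFold_eq (b :: rest) (swapChar a :: acc)
      simp only [List.foldl_cons] at ih ⊢
      rw [s1, ih]
      simp [invertBoardLoop, swapcaseL, h]
termination_by cs _ => cs.length
decreasing_by all_goals (simp [List.length]; try omega)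

-- the turn-flip: B's dict lookup with default equals A's if/elif
theorem turn_flip_eq (s : String) :
    (PySem.Dict.ofList [("b", "w"), ("w", "b")]).getD s s =
      (if s = "b" then "w" else if s = "w" then "b" else s) := by
  by_cases hb : s = "b"
  · subst hb; rfl
  · by_cases hw : s = "w"
    · subst hw; simp [hb]; rfl
    · simp [hb, hw, PySem.Dict.getD, PySem.Dict.ofList, PySem.Dict.empty, PySem.Dict.update,
            PySem.Dict.insert, PySem.Dict.contains, PySem.Dict.get?, List.find?,
            Ne.symm hb]
      rw [show ("w" == s) = false from beq_eq_false_iff_ne.mpr (Ne.symm hw)]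
      rfl

-- ===== VERDICT =====
theorem invert_sfen_spec : Claim_equal_invert_sfen := by
  intro sfen _ hpre
  unfold Spec_invert_sfen invert_sfen invert_sfen_alt
  obtain ⟨f0, f1, f2, f3, rest, hsplit⟩ :
      ∃ f0 f1 f2 f3 rest, PySem.Str.split₀ sfen = f0 :: f1 :: f2 :: f3 :: rest := by
    match h : PySem.Str.split₀ sfen with
    | f0 :: f1 :: f2 :: f3 :: rest => exact ⟨f0, f1, f2, f3, rest, rfl⟩
    | [] | [_] | [_, _] | [_, _, _] =>
      unfold Pre_invert_sfen at hpre; rw [h] at hpre; simp at hpre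
  rw [hsplit]
  have hfold := boardFold_eq f1.toList []
  rw [List.append_nil] at hfold
  simp only []
  have g1 : PySem.List.pyGet? (f0 :: f1 :: f2 :: f3 :: rest) 1 = some f1 := by
    rw [show (1 : Int) = ((1 : Nat) : Int) from rfl, PySem.List.pyGet?_natCast]; rfl
  rw [g1]
  simp only [Option.getD_some]
  set board := String.ofList (swapcaseL (invertBoardLoop f1.toList).reverse) with hb
  have hset1 : (f0 :: f1 :: f2 :: f3 :: rest).set 1 board = f0 :: board :: f2 :: f3 :: rest := rfl
  rw [hset1]
  have g2 : PySem.List.pyGet? (f0 :: board :: f2 :: f3 :: rest) 2 = some f2 := by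
    rw [show (2 : Int) = ((2 : Nat) : Int) from rfl, PySem.List.pyGet?_natCast]; rfl
  rw [g2]
  simp only [Option.getD_some]
  rw [turn_flip_eq, hfold, ← hb]
  have g3 : ∀ (x : String), PySem.List.pyGet? (f0 :: board :: x :: f3 :: rest) 3 = some f3 := by
    intro x
    rw [show (3 : Int) = ((3 : Nat) : Int) from rfl, PySem.List.pyGet?_natCast]; rfl
  by_cases h1 : f2 = "b"
  · simp only [if_pos h1]
    show PySem.Str.join " " ((f0 :: board :: "w" :: f3 :: rest).set 3
        (String.ofList (swapcaseL ((PySem.List.pyGet? (f0 :: board :: "w" :: f3 :: rest) 3).getD "").toList))) = _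
    rw [g3 "w"]; rfl
  · by_cases h2 : f2 = "w"
    · simp only [if_neg h1, if_pos h2]
      show PySem.Str.join " " ((f0 :: board :: "b" :: f3 :: rest).set 3
          (String.ofList (swapcaseL ((PySem.List.pyGet? (f0 :: board :: "b" :: f3 :: rest) 3).getD "").toList))) = _
      rw [g3 "b"]; rfl
    · simp only [if_neg h1, if_neg h2]
      show PySem.Str.join " " ((f0 :: board :: f2 :: f3 :: rest).set 3
          (String.ofList (swapcaseL ((PySem.List.pyGet? (f0 :: board :: f2 :: f3 :: rest) 3).getD "").toList))) = _
      rw [g3 f2]; rfl
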